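-- pv_equiv track=rewrite | github.com/Ceesar99/Telegram_bot | enhanced_feature_engine.py | _get_feature_type
-- ===== SOURCE A (Python) =====
-- def _get_feature_type(feature_name: str) -> str:
--     """Classify feature type based on name"""
--     if any(x in feature_name.lower() for x in ['sma', 'ema', 'wma', 'ma_']):
--         return 'moving_average'
--     elif any(x in feature_name.lower() for x in ['rsi', 'macd', 'stoch', 'williams', 'cci']):
--         return 'momentum'
--     elif any(x in feature_name.lower() for x in ['bb_', 'bollinger', 'donchian', 'keltner']):
--         return 'bands'
--     elif any(x in feature_name.lower() for x in ['atr', 'volatility', 'std_']):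
--         return 'volatility'
--     elif any(x in feature_name.lower() for x in ['volume', 'obv', 'ad_line']):
--         return 'volume'
--     elif any(x in feature_name.lower() for x in ['regime', 'trend', 'momentum']):
--         return 'regime'
--     elif any(x in feature_name.lower() for x in ['hour', 'day', 'month', 'session']):
--         return 'time'
--     elif 'lag' in feature_name.lower():
--         return 'lag'
--     else:
--         return 'other'
-- ===== SOURCE B (Python) =====
-- _LABELS = ['moving_average', 'momentum', 'bands', 'volatility',
--            'volume', 'regime', 'time', 'lag']
--
-- _KEYWORD_PRIORITY = {
--     'sma': 0, 'ema': 0, 'wma': 0, 'ma_': 0,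
--     'rsi': 1, 'macd': 1, 'stoch': 1, 'williams': 1, 'cci': 1,
--     'bb_': 2, 'bollinger': 2, 'donchian': 2, 'keltner': 2,
--     'atr': 3, 'volatility': 3, 'std_': 3,
--     'volume': 4, 'obv': 4, 'ad_line': 4,
--     'regime': 5, 'trend': 5, 'momentum': 5,
--     'hour': 6, 'day': 6, 'month': 6, 'session': 6,
--     'lag': 7,
-- }
--
-- def _get_feature_type(feature_name: str) -> str:
--     """Classify feature type based on name"""
--     s = feature_name.lower()
--     best = len(_LABELS)
--     for i in range(len(s)):
--         for kw, p in _KEYWORD_PRIORITY.items():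
--             if p < best and s.startswith(kw, i):
--                 best = p
--     return _LABELS[best] if best < len(_LABELS) else 'other'
-- ===== Notes on version B (the rewrite author's own statement) =====
-- stated objective: alternative
-- what changed: Replaces the eight-branch elif chain of per-group substring searches by a single character-position scan: every keyword carries a numeric priority, one pass over start positions keeps the minimum priority of any keyword matching there, and the label (or 'other') is read off the final minimum.
import Mathlib
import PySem

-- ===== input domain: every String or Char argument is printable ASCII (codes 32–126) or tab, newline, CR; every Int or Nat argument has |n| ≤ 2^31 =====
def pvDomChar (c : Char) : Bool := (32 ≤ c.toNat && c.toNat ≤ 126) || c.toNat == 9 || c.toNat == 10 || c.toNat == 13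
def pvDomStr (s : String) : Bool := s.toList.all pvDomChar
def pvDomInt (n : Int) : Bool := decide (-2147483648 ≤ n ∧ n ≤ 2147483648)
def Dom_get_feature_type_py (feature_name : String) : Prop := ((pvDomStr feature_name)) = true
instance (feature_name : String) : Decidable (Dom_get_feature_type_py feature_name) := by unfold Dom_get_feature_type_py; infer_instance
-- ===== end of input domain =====

-- B replaces the elif chain of per-group substring searches by a single scan over start
-- positions keeping the minimum priority of any keyword that matches there (alternative).

-- ===== PORT A =====
def get_feature_type_py (feature_name : String) : String :=
  if (["sma", "ema", "wma", "ma_"] : List String).any (fun x => PySem.Str.isIn x (PySem.Str.lower feature_name)) then "moving_average"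
  else if (["rsi", "macd", "stoch", "williams", "cci"] : List String).any (fun x => PySem.Str.isIn x (PySem.Str.lower feature_name)) then "momentum"
  else if (["bb_", "bollinger", "donchian", "keltner"] : List String).any (fun x => PySem.Str.isIn x (PySem.Str.lower feature_name)) then "bands"
  else if (["atr", "volatility", "std_"] : List String).any (fun x => PySem.Str.isIn x (PySem.Str.lower feature_name)) then "volatility"
  else if (["volume", "obv", "ad_line"] : List String).any (fun x => PySem.Str.isIn x (PySem.Str.lower feature_name)) then "volume"
  else if (["regime", "trend", "momentum"] : List String).any (fun x => PySem.Str.isIn x (PySem.Str.lower feature_name)) then "regime"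
  else if (["hour", "day", "month", "session"] : List String).any (fun x => PySem.Str.isIn x (PySem.Str.lower feature_name)) then "time"
  else if PySem.Str.isIn "lag" (PySem.Str.lower feature_name) then "lag"
  else "other"

-- ===== PORT B =====
-- _LABELS
def pvLabels : List String :=
  ["moving_average", "momentum", "bands", "volatility", "volume", "regime", "time", "lag"]

-- _KEYWORD_PRIORITY, in insertion order (dict iteration order)
def pvKw : List (List Char × Nat) :=
  [("sma".toList, 0), ("ema".toList, 0), ("wma".toList, 0), ("ma_".toList, 0),
   ("rsi".toList, 1), ("macd".toList, 1), ("stoch".toList, 1), ("williams".toList, 1), ("cci".toList, 1),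
   ("bb_".toList, 2), ("bollinger".toList, 2), ("donchian".toList, 2), ("keltner".toList, 2),
   ("atr".toList, 3), ("volatility".toList, 3), ("std_".toList, 3),
   ("volume".toList, 4), ("obv".toList, 4), ("ad_line".toList, 4),
   ("regime".toList, 5), ("trend".toList, 5), ("momentum".toList, 5),
   ("hour".toList, 6), ("day".toList, 6), ("month".toList, 6), ("session".toList, 6),
   ("lag".toList, 7)]

-- the double for-loop with the min-priority accumulator (s.startswith(kw, i) = isPrefixOf on s.drop i)
def pvBest (s : List Char) : Nat :=
  (List.range s.length).foldl
    (fun best i =>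
      pvKw.foldl (fun b kp => if kp.2 < b && kp.1.isPrefixOf (s.drop i) then kp.2 else b) best)
    8

def get_feature_type_py_alt (feature_name : String) : String :=
  let s := (PySem.Str.lower feature_name).toList
  let best := pvBest s
  if best < 8 then pvLabels.getD best "other" else "other"

-- ===== PRECONDITION & SPEC =====
def Spec_get_feature_type_py (feature_name : String) (out : String) : Prop := out = get_feature_type_py_alt feature_name
instance (feature_name : String) (out : String) : Decidable (Spec_get_feature_type_py feature_name out) := by unfold Spec_get_feature_type_py; infer_instance

-- ===== CLAIM =====
def Claim_equal_get_feature_type_py : Prop := ∀ (feature_name : String), Dom_get_feature_type_py feature_name → Spec_get_feature_type_py feature_name (get_feature_type_py feature_name)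

-- ===== LEMMAS AND PROOFS =====

-- the "p < b" update step is the min-update step
theorem pvFold_if_min (l : List (List Char × Nat)) (b : Nat) (c : List Char × Nat → Bool) :
    l.foldl (fun b kp => if kp.2 < b && c kp then kp.2 else b) b
      = l.foldl (fun b kp => if c kp then min b kp.2 else b) b := by
  induction l generalizing b with
  | nil => rfl
  | cons kp t ih =>
    simp only [List.foldl_cons]
    rw [ih]
    congr 1
    by_cases h : c kp = true
    · simp [h, Nat.min_def]
      split_ifs <;> omega
    · simp [h]

theorem pvMinfold_le_iff (l : List (List Char × Nat)) (b q : Nat) (c : List Char × Nat → Bool) :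
    (l.foldl (fun b kp => if c kp then min b kp.2 else b) b) ≤ q
      ↔ b ≤ q ∨ ∃ kp ∈ l, c kp = true ∧ kp.2 ≤ q := by
  induction l generalizing b with
  | nil => simp
  | cons kp t ih =>
    simp only [List.foldl_cons]
    by_cases h : c kp = true
    · rw [if_pos h, ih]
      simp only [List.mem_cons, min_le_iff]
      constructor
      · rintro ((hb | hk) | ⟨kp', hm, hc, hle⟩)
        · exact Or.inl hb
        · exact Or.inr ⟨kp, Or.inl rfl, h, hk⟩
        · exact Or.inr ⟨kp', Or.inr hm, hc, hle⟩
      · rintro (hb | ⟨kp', (rfl | hm), hc, hle⟩)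
        · exact Or.inl (Or.inl hb)
        · exact Or.inl (Or.inr hle)
        · exact Or.inr ⟨kp', hm, hc, hle⟩
    · rw [if_neg h, ih]
      simp only [List.mem_cons]
      constructor
      · rintro (hb | ⟨kp', hm, hc, hle⟩)
        · exact Or.inl hb
        · exact Or.inr ⟨kp', Or.inr hm, hc, hle⟩
      · rintro (hb | ⟨kp', (rfl | hm), hc, hle⟩)
        · exact Or.inl hb
        · exact absurd hc h
        · exact Or.inr ⟨kp', hm, hc, hle⟩

theorem pvScan_le_iff (idxs : List Nat) (b q : Nat) (s : List Char) :
    (idxs.foldl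
        (fun best i =>
          pvKw.foldl (fun b kp => if kp.2 < b && kp.1.isPrefixOf (s.drop i) then kp.2 else b) best)
        b) ≤ q
      ↔ b ≤ q ∨ ∃ i ∈ idxs, ∃ kp ∈ pvKw, kp.1.isPrefixOf (s.drop i) = true ∧ kp.2 ≤ q := by
  induction idxs generalizing b with
  | nil => simp
  | cons i t ih =>
    simp only [List.foldl_cons, ih, List.mem_cons]
    rw [pvFold_if_min, pvMinfold_le_iff]
    constructor
    · rintro ((hb | ⟨kp, hm, hc, hle⟩) | ⟨j, hj, kp, hm, hc, hle⟩)
      · exact Or.inl hb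
      · exact Or.inr ⟨i, Or.inl rfl, kp, hm, hc, hle⟩
      · exact Or.inr ⟨j, Or.inr hj, kp, hm, hc, hle⟩
    · rintro (hb | ⟨j, (rfl | hj), kp, hm, hc, hle⟩)
      · exact Or.inl (Or.inl hb)
      · exact Or.inl (Or.inr ⟨kp, hm, hc, hle⟩)
      · exact Or.inr ⟨j, hj, kp, hm, hc, hle⟩

-- a nonempty keyword matches at some scanned position iff it is a substring
theorem pvMatch_iff_isIn (kw s : List Char) (hne : kw ≠ []) :
    (∃ i ∈ List.range s.length, kw.isPrefixOf (s.drop i) = true)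
      ↔ PySem.Chars.isIn kw s = true := by
  rw [← PySem.Chars.exists_prefix_drop_iff_isIn]
  constructor
  · rintro ⟨i, _, hp⟩
    exact ⟨i, List.isPrefixOf_iff_prefix.mp hp⟩
  · rintro ⟨j, hp⟩
    refine ⟨j, List.mem_range.mpr ?_, List.isPrefixOf_iff_prefix.mpr hp⟩
    by_contra h
    rw [List.drop_eq_nil_of_le (by omega)] at hp
    exact hne (List.prefix_nil.mp hp)

theorem pvKw_ne_nil : ∀ kp ∈ pvKw, kp.1 ≠ [] := by decide

theorem pvBest_le_iff (s : List Char) (q : Nat) :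
    pvBest s ≤ q ↔ 8 ≤ q ∨ ∃ kp ∈ pvKw, PySem.Chars.isIn kp.1 s = true ∧ kp.2 ≤ q := by
  unfold pvBest
  rw [pvScan_le_iff]
  constructor
  · rintro (h | ⟨i, hi, kp, hm, hc, hle⟩)
    · exact Or.inl h
    · exact Or.inr ⟨kp, hm, (pvMatch_iff_isIn kp.1 s (pvKw_ne_nil kp hm)).mp ⟨i, hi, hc⟩, hle⟩
  · rintro (h | ⟨kp, hm, hin, hle⟩)
    · exact Or.inl h
    · rcases (pvMatch_iff_isIn kp.1 s (pvKw_ne_nil kp hm)).mpr hin with ⟨i, hi, hc⟩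
      exact Or.inr ⟨i, hi, kp, hm, hc, hle⟩

theorem pvBest_eq (s : List Char) (p : Nat) (hp8 : p ≤ 8)
    (hmatch : p = 8 ∨ ∃ kp ∈ pvKw, PySem.Chars.isIn kp.1 s = true ∧ kp.2 = p)
    (hlow : ∀ kp ∈ pvKw, PySem.Chars.isIn kp.1 s = true → p ≤ kp.2) :
    pvBest s = p := by
  have hub : pvBest s ≤ p := by
    rcases hmatch with rfl | ⟨kp, hm, hin, hpe⟩
    · exact (pvBest_le_iff s 8).mpr (Or.inl le_rfl)
    · exact (pvBest_le_iff s p).mpr (Or.inr ⟨kp, hm, hin, le_of_eq hpe⟩)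
  have hlb : p ≤ pvBest s := by
    rcases (pvBest_le_iff s (pvBest s)).mp le_rfl with h8 | ⟨kp, hm, hin, hle⟩
    · omega
    · exact le_trans (hlow kp hm hin) hle
  omega

-- the elif groups, by priority
def pvGroup : Nat → List String
  | 0 => ["sma", "ema", "wma", "ma_"]
  | 1 => ["rsi", "macd", "stoch", "williams", "cci"]
  | 2 => ["bb_", "bollinger", "donchian", "keltner"]
  | 3 => ["atr", "volatility", "std_"]
  | 4 => ["volume", "obv", "ad_line"]
  | 5 => ["regime", "trend", "momentum"]
  | 6 => ["hour", "day", "month", "session"]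
  | 7 => ["lag"]
  | _ => []

-- every table entry is a keyword of its group
theorem pvKw_group (kp : List Char × Nat) (hm : kp ∈ pvKw) :
    ∃ x : String, kp.1 = x.toList ∧ x ∈ pvGroup kp.2 ∧ kp.2 < 8 := by
  fin_cases hm
  · exact ⟨"sma", rfl, List.Mem.head _, by omega⟩
  · exact ⟨"ema", rfl, List.Mem.tail _ (List.Mem.head _), by omega⟩
  · exact ⟨"wma", rfl, List.Mem.tail _ (List.Mem.tail _ (List.Mem.head _)), by omega⟩
  · exact ⟨"ma_", rfl, List.Mem.tail _ (List.Mem.tail _ (List.Mem.tail _ (List.Mem.head _))), by omega⟩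
  · exact ⟨"rsi", rfl, List.Mem.head _, by omega⟩
  · exact ⟨"macd", rfl, List.Mem.tail _ (List.Mem.head _), by omega⟩
  · exact ⟨"stoch", rfl, List.Mem.tail _ (List.Mem.tail _ (List.Mem.head _)), by omega⟩
  · exact ⟨"williams", rfl, List.Mem.tail _ (List.Mem.tail _ (List.Mem.tail _ (List.Mem.head _))), by omega⟩
  · exact ⟨"cci", rfl, List.Mem.tail _ (List.Mem.tail _ (List.Mem.tail _ (List.Mem.tail _ (List.Mem.head _)))), by omega⟩
  · exact ⟨"bb_", rfl, List.Mem.head _, by omega⟩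
  · exact ⟨"bollinger", rfl, List.Mem.tail _ (List.Mem.head _), by omega⟩
  · exact ⟨"donchian", rfl, List.Mem.tail _ (List.Mem.tail _ (List.Mem.head _)), by omega⟩
  · exact ⟨"keltner", rfl, List.Mem.tail _ (List.Mem.tail _ (List.Mem.tail _ (List.Mem.head _))), by omega⟩
  · exact ⟨"atr", rfl, List.Mem.head _, by omega⟩
  · exact ⟨"volatility", rfl, List.Mem.tail _ (List.Mem.head _), by omega⟩
  · exact ⟨"std_", rfl, List.Mem.tail _ (List.Mem.tail _ (List.Mem.head _)), by omega⟩
  · exact ⟨"volume", rfl, List.Mem.head _, by omega⟩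
  · exact ⟨"obv", rfl, List.Mem.tail _ (List.Mem.head _), by omega⟩
  · exact ⟨"ad_line", rfl, List.Mem.tail _ (List.Mem.tail _ (List.Mem.head _)), by omega⟩
  · exact ⟨"regime", rfl, List.Mem.head _, by omega⟩
  · exact ⟨"trend", rfl, List.Mem.tail _ (List.Mem.head _), by omega⟩
  · exact ⟨"momentum", rfl, List.Mem.tail _ (List.Mem.tail _ (List.Mem.head _)), by omega⟩
  · exact ⟨"hour", rfl, List.Mem.head _, by omega⟩
  · exact ⟨"day", rfl, List.Mem.tail _ (List.Mem.head _), by omega⟩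
  · exact ⟨"month", rfl, List.Mem.tail _ (List.Mem.tail _ (List.Mem.head _)), by omega⟩
  · exact ⟨"session", rfl, List.Mem.tail _ (List.Mem.tail _ (List.Mem.tail _ (List.Mem.head _))), by omega⟩
  · exact ⟨"lag", rfl, List.Mem.head _, by omega⟩

-- every group keyword is a table entry with the group's priority
theorem pvGroup_sub (q : Nat) (hq : q < 8) (x : String) (hx : x ∈ pvGroup q) :
    (x.toList, q) ∈ pvKw := by
  interval_cases q
  · fin_cases hx
    · exact List.Mem.head _
    · exact List.Mem.tail _ (List.Mem.head _)
    · exact List.Mem.tail _ (List.Mem.tail _ (List.Mem.head _))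
    · exact List.Mem.tail _ (List.Mem.tail _ (List.Mem.tail _ (List.Mem.head _)))
  · fin_cases hx
    · exact List.Mem.tail _ (List.Mem.tail _ (List.Mem.tail _ (List.Mem.tail _ (List.Mem.head _))))
    · exact List.Mem.tail _ (List.Mem.tail _ (List.Mem.tail _ (List.Mem.tail _ (List.Mem.tail _ (List.Mem.head _)))))
    · exact List.Mem.tail _ (List.Mem.tail _ (List.Mem.tail _ (List.Mem.tail _ (List.Mem.tail _ (List.Mem.tail _ (List.Mem.head _))))))
    · exact List.Mem.tail _ (List.Mem.tail _ (List.Mem.tail _ (List.Mem.tail _ (List.Mem.tail _ (List.Mem.tail _ (List.Mem.tail _ (List.Mem.head _)))))))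
    · exact List.Mem.tail _ (List.Mem.tail _ (List.Mem.tail _ (List.Mem.tail _ (List.Mem.tail _ (List.Mem.tail _ (List.Mem.tail _ (List.Mem.tail _ (List.Mem.head _))))))))
  · fin_cases hx
    · exact List.Mem.tail _ (List.Mem.tail _ (List.Mem.tail _ (List.Mem.tail _ (List.Mem.tail _ (List.Mem.tail _ (List.Mem.tail _ (List.Mem.tail _ (List.Mem.tail _ (List.Mem.head _)))))))))
    · exact List.Mem.tail _ (List.Mem.tail _ (List.Mem.tail _ (List.Mem.tail _ (List.Mem.tail _ (List.Mem.tail _ (List.Mem.tail _ (List.Mem.tail _ (List.Mem.tail _ (List.Mem.tail _ (List.Mem.head _))))))))))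
    · exact List.Mem.tail _ (List.Mem.tail _ (List.Mem.tail _ (List.Mem.tail _ (List.Mem.tail _ (List.Mem.tail _ (List.Mem.tail _ (List.Mem.tail _ (List.Mem.tail _ (List.Mem.tail _ (List.Mem.tail _ (List.Mem.head _)))))))))))
    · exact List.Mem.tail _ (List.Mem.tail _ (List.Mem.tail _ (List.Mem.tail _ (List.Mem.tail _ (List.Mem.tail _ (List.Mem.tail _ (List.Mem.tail _ (List.Mem.tail _ (List.Mem.tail _ (List.Mem.tail _ (List.Mem.tail _ (List.Mem.head _))))))))))))
  · fin_cases hx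
    · exact List.Mem.tail _ (List.Mem.tail _ (List.Mem.tail _ (List.Mem.tail _ (List.Mem.tail _ (List.Mem.tail _ (List.Mem.tail _ (List.Mem.tail _ (List.Mem.tail _ (List.Mem.tail _ (List.Mem.tail _ (List.Mem.tail _ (List.Mem.tail _ (List.Mem.head _)))))))))))))
    · exact List.Mem.tail _ (List.Mem.tail _ (List.Mem.tail _ (List.Mem.tail _ (List.Mem.tail _ (List.Mem.tail _ (List.Mem.tail _ (List.Mem.tail _ (List.Mem.tail _ (List.Mem.tail _ (List.Mem.tail _ (List.Mem.tail _ (List.Mem.tail _ (List.Mem.tail _ (List.Mem.head _))))))))))))))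
    · exact List.Mem.tail _ (List.Mem.tail _ (List.Mem.tail _ (List.Mem.tail _ (List.Mem.tail _ (List.Mem.tail _ (List.Mem.tail _ (List.Mem.tail _ (List.Mem.tail _ (List.Mem.tail _ (List.Mem.tail _ (List.Mem.tail _ (List.Mem.tail _ (List.Mem.tail _ (List.Mem.tail _ (List.Mem.head _)))))))))))))))
  · fin_cases hx
    · exact List.Mem.tail _ (List.Mem.tail _ (List.Mem.tail _ (List.Mem.tail _ (List.Mem.tail _ (List.Mem.tail _ (List.Mem.tail _ (List.Mem.tail _ (List.Mem.tail _ (List.Mem.tail _ (List.Mem.tail _ (List.Mem.tail _ (List.Mem.tail _ (List.Mem.tail _ (List.Mem.tail _ (List.Mem.tail _ (List.Mem.head _))))))))))))))))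
    · exact List.Mem.tail _ (List.Mem.tail _ (List.Mem.tail _ (List.Mem.tail _ (List.Mem.tail _ (List.Mem.tail _ (List.Mem.tail _ (List.Mem.tail _ (List.Mem.tail _ (List.Mem.tail _ (List.Mem.tail _ (List.Mem.tail _ (List.Mem.tail _ (List.Mem.tail _ (List.Mem.tail _ (List.Mem.tail _ (List.Mem.tail _ (List.Mem.head _)))))))))))))))))
    · exact List.Mem.tail _ (List.Mem.tail _ (List.Mem.tail _ (List.Mem.tail _ (List.Mem.tail _ (List.Mem.tail _ (List.Mem.tail _ (List.Mem.tail _ (List.Mem.tail _ (List.Mem.tail _ (List.Mem.tail _ (List.Mem.tail _ (List.Mem.tail _ (List.Mem.tail _ (List.Mem.tail _ (List.Mem.tail _ (List.Mem.tail _ (List.Mem.tail _ (List.Mem.head _))))))))))))))))))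
  · fin_cases hx
    · exact List.Mem.tail _ (List.Mem.tail _ (List.Mem.tail _ (List.Mem.tail _ (List.Mem.tail _ (List.Mem.tail _ (List.Mem.tail _ (List.Mem.tail _ (List.Mem.tail _ (List.Mem.tail _ (List.Mem.tail _ (List.Mem.tail _ (List.Mem.tail _ (List.Mem.tail _ (List.Mem.tail _ (List.Mem.tail _ (List.Mem.tail _ (List.Mem.tail _ (List.Mem.tail _ (List.Mem.head _)))))))))))))))))))
    · exact List.Mem.tail _ (List.Mem.tail _ (List.Mem.tail _ (List.Mem.tail _ (List.Mem.tail _ (List.Mem.tail _ (List.Mem.tail _ (List.Mem.tail _ (List.Mem.tail _ (List.Mem.tail _ (List.Mem.tail _ (List.Mem.tail _ (List.Mem.tail _ (List.Mem.tail _ (List.Mem.tail _ (List.Mem.tail _ (List.Mem.tail _ (List.Mem.tail _ (List.Mem.tail _ (List.Mem.tail _ (List.Mem.head _))))))))))))))))))))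
    · exact List.Mem.tail _ (List.Mem.tail _ (List.Mem.tail _ (List.Mem.tail _ (List.Mem.tail _ (List.Mem.tail _ (List.Mem.tail _ (List.Mem.tail _ (List.Mem.tail _ (List.Mem.tail _ (List.Mem.tail _ (List.Mem.tail _ (List.Mem.tail _ (List.Mem.tail _ (List.Mem.tail _ (List.Mem.tail _ (List.Mem.tail _ (List.Mem.tail _ (List.Mem.tail _ (List.Mem.tail _ (List.Mem.tail _ (List.Mem.head _)))))))))))))))))))))
  · fin_cases hx
    · exact List.Mem.tail _ (List.Mem.tail _ (List.Mem.tail _ (List.Mem.tail _ (List.Mem.tail _ (List.Mem.tail _ (List.Mem.tail _ (List.Mem.tail _ (List.Mem.tail _ (List.Mem.tail _ (List.Mem.tail _ (List.Mem.tail _ (List.Mem.tail _ (List.Mem.tail _ (List.Mem.tail _ (List.Mem.tail _ (List.Mem.tail _ (List.Mem.tail _ (List.Mem.tail _ (List.Mem.tail _ (List.Mem.tail _ (List.Mem.tail _ (List.Mem.head _))))))))))))))))))))))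
    · exact List.Mem.tail _ (List.Mem.tail _ (List.Mem.tail _ (List.Mem.tail _ (List.Mem.tail _ (List.Mem.tail _ (List.Mem.tail _ (List.Mem.tail _ (List.Mem.tail _ (List.Mem.tail _ (List.Mem.tail _ (List.Mem.tail _ (List.Mem.tail _ (List.Mem.tail _ (List.Mem.tail _ (List.Mem.tail _ (List.Mem.tail _ (List.Mem.tail _ (List.Mem.tail _ (List.Mem.tail _ (List.Mem.tail _ (List.Mem.tail _ (List.Mem.tail _ (List.Mem.head _)))))))))))))))))))))))
    · exact List.Mem.tail _ (List.Mem.tail _ (List.Mem.tail _ (List.Mem.tail _ (List.Mem.tail _ (List.Mem.tail _ (List.Mem.tail _ (List.Mem.tail _ (List.Mem.tail _ (List.Mem.tail _ (List.Mem.tail _ (List.Mem.tail _ (List.Mem.tail _ (List.Mem.tail _ (List.Mem.tail _ (List.Mem.tail _ (List.Mem.tail _ (List.Mem.tail _ (List.Mem.tail _ (List.Mem.tail _ (List.Mem.tail _ (List.Mem.tail _ (List.Mem.tail _ (List.Mem.tail _ (List.Mem.head _))))))))))))))))))))))))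
    · exact List.Mem.tail _ (List.Mem.tail _ (List.Mem.tail _ (List.Mem.tail _ (List.Mem.tail _ (List.Mem.tail _ (List.Mem.tail _ (List.Mem.tail _ (List.Mem.tail _ (List.Mem.tail _ (List.Mem.tail _ (List.Mem.tail _ (List.Mem.tail _ (List.Mem.tail _ (List.Mem.tail _ (List.Mem.tail _ (List.Mem.tail _ (List.Mem.tail _ (List.Mem.tail _ (List.Mem.tail _ (List.Mem.tail _ (List.Mem.tail _ (List.Mem.tail _ (List.Mem.tail _ (List.Mem.tail _ (List.Mem.head _)))))))))))))))))))))))))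
  · fin_cases hx
    · exact List.Mem.tail _ (List.Mem.tail _ (List.Mem.tail _ (List.Mem.tail _ (List.Mem.tail _ (List.Mem.tail _ (List.Mem.tail _ (List.Mem.tail _ (List.Mem.tail _ (List.Mem.tail _ (List.Mem.tail _ (List.Mem.tail _ (List.Mem.tail _ (List.Mem.tail _ (List.Mem.tail _ (List.Mem.tail _ (List.Mem.tail _ (List.Mem.tail _ (List.Mem.tail _ (List.Mem.tail _ (List.Mem.tail _ (List.Mem.tail _ (List.Mem.tail _ (List.Mem.tail _ (List.Mem.tail _ (List.Mem.tail _ (List.Mem.head _))))))))))))))))))))))))))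

theorem pv_not_any {l : List String} {f : String → Bool} (h : ¬ l.any f = true)
    {x : String} (hx : x ∈ l) : ¬ f x = true :=
  fun hfx => h (List.any_eq_true.mpr ⟨x, hx, hfx⟩)

-- ===== VERDICT =====
theorem get_feature_type_py_spec : Claim_equal_get_feature_type_py := by
  intro name _
  unfold Spec_get_feature_type_py
  by_cases h0 : (["sma", "ema", "wma", "ma_"] : List String).any (fun x => PySem.Str.isIn x (PySem.Str.lower name)) = true
  · have hmatch : (0:Nat) = 8 ∨ ∃ kp ∈ pvKw, PySem.Chars.isIn kp.1 ((PySem.Str.lower name).toList) = true ∧ kp.2 = 0 := by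
      rcases List.any_eq_true.mp h0 with ⟨x, hx, hin⟩
      rw [PySem.Str.isIn_eq] at hin
      exact Or.inr ⟨(x.toList, 0), pvGroup_sub 0 (by omega) x hx, hin, rfl⟩
    have hlow : ∀ kp ∈ pvKw, PySem.Chars.isIn kp.1 ((PySem.Str.lower name).toList) = true → 0 ≤ kp.2 := by
      intro kp _ _; omega
    have hbest : pvBest ((PySem.Str.lower name).toList) = 0 := pvBest_eq _ 0 (by omega) hmatch hlow
    show get_feature_type_py name = (if pvBest ((PySem.Str.lower name).toList) < 8 then pvLabels.getD (pvBest ((PySem.Str.lower name).toList)) "other" else "other")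
    rw [hbest]
    unfold get_feature_type_py
    rw [if_pos h0]
    rfl
  by_cases h1 : (["rsi", "macd", "stoch", "williams", "cci"] : List String).any (fun x => PySem.Str.isIn x (PySem.Str.lower name)) = true
  · have hmatch : (1:Nat) = 8 ∨ ∃ kp ∈ pvKw, PySem.Chars.isIn kp.1 ((PySem.Str.lower name).toList) = true ∧ kp.2 = 1 := by
      rcases List.any_eq_true.mp h1 with ⟨x, hx, hin⟩
      rw [PySem.Str.isIn_eq] at hin
      exact Or.inr ⟨(x.toList, 1), pvGroup_sub 1 (by omega) x hx, hin, rfl⟩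
    have hlow : ∀ kp ∈ pvKw, PySem.Chars.isIn kp.1 ((PySem.Str.lower name).toList) = true → 1 ≤ kp.2 := by
      rintro ⟨k, q⟩ hm hin
      obtain ⟨x, he, hxg, h8⟩ := pvKw_group (k, q) hm
      by_contra hcon
      push Not at hcon
      have hq : q < 1 := hcon
      interval_cases q
      · exact pv_not_any h0 hxg (by rw [PySem.Str.isIn_eq, ← he]; exact hin)
    have hbest : pvBest ((PySem.Str.lower name).toList) = 1 := pvBest_eq _ 1 (by omega) hmatch hlow
    show get_feature_type_py name = (if pvBest ((PySem.Str.lower name).toList) < 8 then pvLabels.getD (pvBest ((PySem.Str.lower name).toList)) "other" else "other")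
    rw [hbest]
    unfold get_feature_type_py
    rw [if_neg h0, if_pos h1]
    rfl
  by_cases h2 : (["bb_", "bollinger", "donchian", "keltner"] : List String).any (fun x => PySem.Str.isIn x (PySem.Str.lower name)) = true
  · have hmatch : (2:Nat) = 8 ∨ ∃ kp ∈ pvKw, PySem.Chars.isIn kp.1 ((PySem.Str.lower name).toList) = true ∧ kp.2 = 2 := by
      rcases List.any_eq_true.mp h2 with ⟨x, hx, hin⟩
      rw [PySem.Str.isIn_eq] at hin
      exact Or.inr ⟨(x.toList, 2), pvGroup_sub 2 (by omega) x hx, hin, rfl⟩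
    have hlow : ∀ kp ∈ pvKw, PySem.Chars.isIn kp.1 ((PySem.Str.lower name).toList) = true → 2 ≤ kp.2 := by
      rintro ⟨k, q⟩ hm hin
      obtain ⟨x, he, hxg, h8⟩ := pvKw_group (k, q) hm
      by_contra hcon
      push Not at hcon
      have hq : q < 2 := hcon
      interval_cases q
      · exact pv_not_any h0 hxg (by rw [PySem.Str.isIn_eq, ← he]; exact hin)
      · exact pv_not_any h1 hxg (by rw [PySem.Str.isIn_eq, ← he]; exact hin)
    have hbest : pvBest ((PySem.Str.lower name).toList) = 2 := pvBest_eq _ 2 (by omega) hmatch hlow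
    show get_feature_type_py name = (if pvBest ((PySem.Str.lower name).toList) < 8 then pvLabels.getD (pvBest ((PySem.Str.lower name).toList)) "other" else "other")
    rw [hbest]
    unfold get_feature_type_py
    rw [if_neg h0, if_neg h1, if_pos h2]
    rfl
  by_cases h3 : (["atr", "volatility", "std_"] : List String).any (fun x => PySem.Str.isIn x (PySem.Str.lower name)) = true
  · have hmatch : (3:Nat) = 8 ∨ ∃ kp ∈ pvKw, PySem.Chars.isIn kp.1 ((PySem.Str.lower name).toList) = true ∧ kp.2 = 3 := by
      rcases List.any_eq_true.mp h3 with ⟨x, hx, hin⟩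
      rw [PySem.Str.isIn_eq] at hin
      exact Or.inr ⟨(x.toList, 3), pvGroup_sub 3 (by omega) x hx, hin, rfl⟩
    have hlow : ∀ kp ∈ pvKw, PySem.Chars.isIn kp.1 ((PySem.Str.lower name).toList) = true → 3 ≤ kp.2 := by
      rintro ⟨k, q⟩ hm hin
      obtain ⟨x, he, hxg, h8⟩ := pvKw_group (k, q) hm
      by_contra hcon
      push Not at hcon
      have hq : q < 3 := hcon
      interval_cases q
      · exact pv_not_any h0 hxg (by rw [PySem.Str.isIn_eq, ← he]; exact hin)
      · exact pv_not_any h1 hxg (by rw [PySem.Str.isIn_eq, ← he]; exact hin)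
      · exact pv_not_any h2 hxg (by rw [PySem.Str.isIn_eq, ← he]; exact hin)
    have hbest : pvBest ((PySem.Str.lower name).toList) = 3 := pvBest_eq _ 3 (by omega) hmatch hlow
    show get_feature_type_py name = (if pvBest ((PySem.Str.lower name).toList) < 8 then pvLabels.getD (pvBest ((PySem.Str.lower name).toList)) "other" else "other")
    rw [hbest]
    unfold get_feature_type_py
    rw [if_neg h0, if_neg h1, if_neg h2, if_pos h3]
    rfl
  by_cases h4 : (["volume", "obv", "ad_line"] : List String).any (fun x => PySem.Str.isIn x (PySem.Str.lower name)) = true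
  · have hmatch : (4:Nat) = 8 ∨ ∃ kp ∈ pvKw, PySem.Chars.isIn kp.1 ((PySem.Str.lower name).toList) = true ∧ kp.2 = 4 := by
      rcases List.any_eq_true.mp h4 with ⟨x, hx, hin⟩
      rw [PySem.Str.isIn_eq] at hin
      exact Or.inr ⟨(x.toList, 4), pvGroup_sub 4 (by omega) x hx, hin, rfl⟩
    have hlow : ∀ kp ∈ pvKw, PySem.Chars.isIn kp.1 ((PySem.Str.lower name).toList) = true → 4 ≤ kp.2 := by
      rintro ⟨k, q⟩ hm hin
      obtain ⟨x, he, hxg, h8⟩ := pvKw_group (k, q) hm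
      by_contra hcon
      push Not at hcon
      have hq : q < 4 := hcon
      interval_cases q
      · exact pv_not_any h0 hxg (by rw [PySem.Str.isIn_eq, ← he]; exact hin)
      · exact pv_not_any h1 hxg (by rw [PySem.Str.isIn_eq, ← he]; exact hin)
      · exact pv_not_any h2 hxg (by rw [PySem.Str.isIn_eq, ← he]; exact hin)
      · exact pv_not_any h3 hxg (by rw [PySem.Str.isIn_eq, ← he]; exact hin)
    have hbest : pvBest ((PySem.Str.lower name).toList) = 4 := pvBest_eq _ 4 (by omega) hmatch hlow
    show get_feature_type_py name = (if pvBest ((PySem.Str.lower name).toList) < 8 then pvLabels.getD (pvBest ((PySem.Str.lower name).toList)) "other" else "other")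
    rw [hbest]
    unfold get_feature_type_py
    rw [if_neg h0, if_neg h1, if_neg h2, if_neg h3, if_pos h4]
    rfl
  by_cases h5 : (["regime", "trend", "momentum"] : List String).any (fun x => PySem.Str.isIn x (PySem.Str.lower name)) = true
  · have hmatch : (5:Nat) = 8 ∨ ∃ kp ∈ pvKw, PySem.Chars.isIn kp.1 ((PySem.Str.lower name).toList) = true ∧ kp.2 = 5 := by
      rcases List.any_eq_true.mp h5 with ⟨x, hx, hin⟩
      rw [PySem.Str.isIn_eq] at hin
      exact Or.inr ⟨(x.toList, 5), pvGroup_sub 5 (by omega) x hx, hin, rfl⟩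
    have hlow : ∀ kp ∈ pvKw, PySem.Chars.isIn kp.1 ((PySem.Str.lower name).toList) = true → 5 ≤ kp.2 := by
      rintro ⟨k, q⟩ hm hin
      obtain ⟨x, he, hxg, h8⟩ := pvKw_group (k, q) hm
      by_contra hcon
      push Not at hcon
      have hq : q < 5 := hcon
      interval_cases q
      · exact pv_not_any h0 hxg (by rw [PySem.Str.isIn_eq, ← he]; exact hin)
      · exact pv_not_any h1 hxg (by rw [PySem.Str.isIn_eq, ← he]; exact hin)
      · exact pv_not_any h2 hxg (by rw [PySem.Str.isIn_eq, ← he]; exact hin)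
      · exact pv_not_any h3 hxg (by rw [PySem.Str.isIn_eq, ← he]; exact hin)
      · exact pv_not_any h4 hxg (by rw [PySem.Str.isIn_eq, ← he]; exact hin)
    have hbest : pvBest ((PySem.Str.lower name).toList) = 5 := pvBest_eq _ 5 (by omega) hmatch hlow
    show get_feature_type_py name = (if pvBest ((PySem.Str.lower name).toList) < 8 then pvLabels.getD (pvBest ((PySem.Str.lower name).toList)) "other" else "other")
    rw [hbest]
    unfold get_feature_type_py
    rw [if_neg h0, if_neg h1, if_neg h2, if_neg h3, if_neg h4, if_pos h5]
    rfl
  by_cases h6 : (["hour", "day", "month", "session"] : List String).any (fun x => PySem.Str.isIn x (PySem.Str.lower name)) = true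
  · have hmatch : (6:Nat) = 8 ∨ ∃ kp ∈ pvKw, PySem.Chars.isIn kp.1 ((PySem.Str.lower name).toList) = true ∧ kp.2 = 6 := by
      rcases List.any_eq_true.mp h6 with ⟨x, hx, hin⟩
      rw [PySem.Str.isIn_eq] at hin
      exact Or.inr ⟨(x.toList, 6), pvGroup_sub 6 (by omega) x hx, hin, rfl⟩
    have hlow : ∀ kp ∈ pvKw, PySem.Chars.isIn kp.1 ((PySem.Str.lower name).toList) = true → 6 ≤ kp.2 := by
      rintro ⟨k, q⟩ hm hin
      obtain ⟨x, he, hxg, h8⟩ := pvKw_group (k, q) hm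
      by_contra hcon
      push Not at hcon
      have hq : q < 6 := hcon
      interval_cases q
      · exact pv_not_any h0 hxg (by rw [PySem.Str.isIn_eq, ← he]; exact hin)
      · exact pv_not_any h1 hxg (by rw [PySem.Str.isIn_eq, ← he]; exact hin)
      · exact pv_not_any h2 hxg (by rw [PySem.Str.isIn_eq, ← he]; exact hin)
      · exact pv_not_any h3 hxg (by rw [PySem.Str.isIn_eq, ← he]; exact hin)
      · exact pv_not_any h4 hxg (by rw [PySem.Str.isIn_eq, ← he]; exact hin)
      · exact pv_not_any h5 hxg (by rw [PySem.Str.isIn_eq, ← he]; exact hin)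
    have hbest : pvBest ((PySem.Str.lower name).toList) = 6 := pvBest_eq _ 6 (by omega) hmatch hlow
    show get_feature_type_py name = (if pvBest ((PySem.Str.lower name).toList) < 8 then pvLabels.getD (pvBest ((PySem.Str.lower name).toList)) "other" else "other")
    rw [hbest]
    unfold get_feature_type_py
    rw [if_neg h0, if_neg h1, if_neg h2, if_neg h3, if_neg h4, if_neg h5, if_pos h6]
    rfl
  by_cases h7 : PySem.Str.isIn "lag" (PySem.Str.lower name) = true
  · have hmatch : (7:Nat) = 8 ∨ ∃ kp ∈ pvKw, PySem.Chars.isIn kp.1 ((PySem.Str.lower name).toList) = true ∧ kp.2 = 7 :=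
      Or.inr ⟨("lag".toList, 7), pvGroup_sub 7 (by omega) "lag" (List.Mem.head _),
        by rw [← PySem.Str.isIn_eq]; exact h7, rfl⟩
    have hlow : ∀ kp ∈ pvKw, PySem.Chars.isIn kp.1 ((PySem.Str.lower name).toList) = true → 7 ≤ kp.2 := by
      rintro ⟨k, q⟩ hm hin
      obtain ⟨x, he, hxg, h8⟩ := pvKw_group (k, q) hm
      by_contra hcon
      push Not at hcon
      have hq : q < 7 := hcon
      interval_cases q
      · exact pv_not_any h0 hxg (by rw [PySem.Str.isIn_eq, ← he]; exact hin)
      · exact pv_not_any h1 hxg (by rw [PySem.Str.isIn_eq, ← he]; exact hin)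
      · exact pv_not_any h2 hxg (by rw [PySem.Str.isIn_eq, ← he]; exact hin)
      · exact pv_not_any h3 hxg (by rw [PySem.Str.isIn_eq, ← he]; exact hin)
      · exact pv_not_any h4 hxg (by rw [PySem.Str.isIn_eq, ← he]; exact hin)
      · exact pv_not_any h5 hxg (by rw [PySem.Str.isIn_eq, ← he]; exact hin)
      · exact pv_not_any h6 hxg (by rw [PySem.Str.isIn_eq, ← he]; exact hin)
    have hbest : pvBest ((PySem.Str.lower name).toList) = 7 := pvBest_eq _ 7 (by omega) hmatch hlow
    show get_feature_type_py name = (if pvBest ((PySem.Str.lower name).toList) < 8 then pvLabels.getD (pvBest ((PySem.Str.lower name).toList)) "other" else "other")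
    rw [hbest]
    unfold get_feature_type_py
    rw [if_neg h0, if_neg h1, if_neg h2, if_neg h3, if_neg h4, if_neg h5, if_neg h6, if_pos h7]
    rfl
  have hmatch : (8:Nat) = 8 ∨ ∃ kp ∈ pvKw, PySem.Chars.isIn kp.1 ((PySem.Str.lower name).toList) = true ∧ kp.2 = 8 := Or.inl rfl
  have hlow : ∀ kp ∈ pvKw, PySem.Chars.isIn kp.1 ((PySem.Str.lower name).toList) = true → 8 ≤ kp.2 := by
    rintro ⟨k, q⟩ hm hin
    obtain ⟨x, he, hxg, h8⟩ := pvKw_group (k, q) hm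
    by_contra hcon
    push Not at hcon
    have hq : q < 8 := hcon
    interval_cases q
    · exact pv_not_any h0 hxg (by rw [PySem.Str.isIn_eq, ← he]; exact hin)
    · exact pv_not_any h1 hxg (by rw [PySem.Str.isIn_eq, ← he]; exact hin)
    · exact pv_not_any h2 hxg (by rw [PySem.Str.isIn_eq, ← he]; exact hin)
    · exact pv_not_any h3 hxg (by rw [PySem.Str.isIn_eq, ← he]; exact hin)
    · exact pv_not_any h4 hxg (by rw [PySem.Str.isIn_eq, ← he]; exact hin)
    · exact pv_not_any h5 hxg (by rw [PySem.Str.isIn_eq, ← he]; exact hin)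
    · exact pv_not_any h6 hxg (by rw [PySem.Str.isIn_eq, ← he]; exact hin)
    · have hxe : x = "lag" := List.mem_singleton.mp hxg
      subst hxe
      exact h7 (by rw [PySem.Str.isIn_eq, ← he]; exact hin)
  have hbest : pvBest ((PySem.Str.lower name).toList) = 8 := pvBest_eq _ 8 (by omega) hmatch hlow
  show get_feature_type_py name = (if pvBest ((PySem.Str.lower name).toList) < 8 then pvLabels.getD (pvBest ((PySem.Str.lower name).toList)) "other" else "other")
  rw [hbest]
  unfold get_feature_type_py
  rw [if_neg h0, if_neg h1, if_neg h2, if_neg h3, if_neg h4, if_neg h5, if_neg h6, if_neg h7]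
  rfl
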